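-- pv_equiv track=rewrite | github.com/BristonLowell/vinnies-brain-backend | main.py | _recent_assistant_texts
-- ===== SOURCE A (Python) =====
-- from typing import List, Optional, Dict, Any, Tuple, Set
--
-- def _recent_assistant_texts(history: List[Dict[str, Any]], max_n: int = 10) -> List[str]:
--     out: List[str] = []
--     for m in reversed(history or []):
--         if len(out) >= max_n:
--             break
--         if (m.get("role") or "").strip() == "assistant":
--             out.append((m.get("text") or "").strip())
--     return out
-- ===== SOURCE B (Python) =====
-- from typing import List, Optional, Dict, Any, Tuple, Set
--
-- def _recent_assistant_texts(history: List[Dict[str, Any]], max_n: int = 10) -> List[str]: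
--     texts = [(m.get("text") or "").strip()
--              for m in (history or [])
--              if (m.get("role") or "").strip() == "assistant"]
--     return list(reversed(texts))[:max(max_n, 0)]
-- ===== Notes on version B (the rewrite author's own statement) =====
-- stated objective: simpler
-- what changed: Replaced the reverse traversal with an early break and a counted accumulator by a forward filter-and-map comprehension of all assistant texts, then reverse and cap with a slice [:max(max_n,0)].
import Mathlib
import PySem

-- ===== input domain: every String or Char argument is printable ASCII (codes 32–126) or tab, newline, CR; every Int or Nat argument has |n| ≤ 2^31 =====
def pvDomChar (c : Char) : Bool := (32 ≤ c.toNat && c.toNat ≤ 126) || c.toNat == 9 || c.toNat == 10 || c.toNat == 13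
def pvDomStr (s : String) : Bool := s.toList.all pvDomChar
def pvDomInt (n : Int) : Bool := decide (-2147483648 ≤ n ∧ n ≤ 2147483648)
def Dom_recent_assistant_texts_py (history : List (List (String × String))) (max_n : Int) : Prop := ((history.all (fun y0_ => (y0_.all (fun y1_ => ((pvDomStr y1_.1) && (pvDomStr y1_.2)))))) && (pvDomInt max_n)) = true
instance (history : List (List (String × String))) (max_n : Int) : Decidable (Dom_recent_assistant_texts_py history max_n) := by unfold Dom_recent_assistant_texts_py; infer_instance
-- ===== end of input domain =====

-- B replaces A's reverse traversal with an early break by a forward filter/map, then reverse-and-cap (simpler decomposition; return-value equivalence).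
-- ===== PORT A =====
-- for m in reversed(history or []): break when len(out) >= max_n; append stripped text of assistant messages
def pvGoA : List (List (String × String)) → List String → Int → List String
  | [], out, _ => out
  | m :: rest, out, max_n =>
    if (out.length : Int) ≥ max_n then out
    else if PySem.Str.strip ((m.lookup "role").getD "") = "assistant" then
      pvGoA rest (out ++ [PySem.Str.strip ((m.lookup "text").getD "")]) max_n
    else pvGoA rest out max_n

def recent_assistant_texts_py (history : List (List (String × String))) (max_n : Int) : List String :=
  pvGoA history.reverse [] max_n

-- ===== PORT B =====
-- texts = [strip(text) for m in history if strip(role)=='assistant']; return list(reversed(texts))[:max(max_n,0)]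
def recent_assistant_texts_py_alt (history : List (List (String × String))) (max_n : Int) : List String :=
  let texts := (history.filter (fun m => PySem.Str.strip ((m.lookup "role").getD "") = "assistant")).map
      (fun m => PySem.Str.strip ((m.lookup "text").getD ""))
  texts.reverse.take (max max_n 0).toNat
-- ===== PRECONDITION & SPEC =====
def Spec_recent_assistant_texts_py (history : List (List (String × String))) (max_n : Int) (out : List String) : Prop := out = recent_assistant_texts_py_alt history max_n
instance (history : List (List (String × String))) (max_n : Int) (out : List String) : Decidable (Spec_recent_assistant_texts_py history max_n out) := by unfold Spec_recent_assistant_texts_py; infer_instance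

-- ===== CLAIM (what is proved, stated in full; the proofs are below) =====
def Claim_equal_recent_assistant_texts_py : Prop := ∀ (history : List (List (String × String))) (max_n : Int), Dom_recent_assistant_texts_py history max_n → Spec_recent_assistant_texts_py history max_n (recent_assistant_texts_py history max_n)

-- ===== LEMMAS AND PROOFS =====
def pvTexts (l : List (List (String × String))) : List String :=
  (l.filter (fun m => PySem.Str.strip ((m.lookup "role").getD "") = "assistant")).map
      (fun m => PySem.Str.strip ((m.lookup "text").getD ""))

theorem pvGoA_eq (max_n : Int) : ∀ (l : List (List (String × String))) (out : List String),
    pvGoA l out max_n = out ++ (pvTexts l).take (max_n - out.length).toNat := by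
  intro l
  induction l with
  | nil => intro out; simp [pvGoA, pvTexts]
  | cons m rest ih =>
    intro out
    by_cases hb : (out.length : Int) ≥ max_n
    · have : (max_n - out.length).toNat = 0 := by omega
      simp [pvGoA, hb, this]
    · by_cases hr : PySem.Str.strip ((m.lookup "role").getD "") = "assistant"
      · rw [pvGoA, if_neg hb, if_pos hr, ih]
        have h1 : (max_n - ((out ++ [PySem.Str.strip ((m.lookup "text").getD "")]).length : Int)).toNat + 1
            = (max_n - out.length).toNat := by simp; omega
        simp only [pvTexts, List.filter_cons, hr, decide_true, if_true, List.map_cons]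
        rw [← h1, List.take_succ_cons]
        simp [pvTexts, List.append_assoc]
      · rw [pvGoA, if_neg hb, if_neg hr, ih]
        simp [pvTexts, hr]

theorem pvTexts_reverse (l : List (List (String × String))) : pvTexts l.reverse = (pvTexts l).reverse := by
  simp [pvTexts]

-- ===== VERDICT (by name: the statement is the Claim_ definition above) =====
theorem recent_assistant_texts_py_spec : Claim_equal_recent_assistant_texts_py := by
  intro history max_n _
  show recent_assistant_texts_py history max_n = recent_assistant_texts_py_alt history max_n
  rw [recent_assistant_texts_py, pvGoA_eq, pvTexts_reverse]
  simp only [recent_assistant_texts_py_alt, List.nil_append, List.length_nil, Int.natCast_zero, Int.sub_zero]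
  have h : (max max_n 0).toNat = max_n.toNat := by omega
  rw [h]; rfl
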